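-- pv_equiv track=rewrite | github.com/AkstElena/diving_into_python | homeworks/homework_6/hw6_2.py | is_attacking
-- ===== SOURCE A (Python) =====
-- def is_attacking(q1, q2):
--     if q1[0] == q2[0] or q1[1] == q2[1]:
--         return False
--     for i in range(1, 9 - q1[0]):
--         if q1[0] + i == q2[0] and q1[1] + i == q2[1]:
--             return False
--         elif q1[0] + i == q2[0] and q1[1] - i == q2[1]:
--             return False
--     for i in range(q1[0]):
--         if q1[0] - i == q2[0] and q1[1] - i == q2[1]:
--             return False
--         elif q1[0] - i == q2[0] and q1[1] + i == q2[1]: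
--             return False
--     else:
--         return True
-- ===== SOURCE B (Python) =====
-- def is_attacking(q1, q2):
--     return (q1[0] != q2[0]
--             and q1[1] != q2[1]
--             and abs(q1[0] - q2[0]) != abs(q1[1] - q2[1]))
-- ===== Notes on version B (the rewrite author's own statement) =====
-- stated objective: simpler
-- what changed: Replaces A's two diagonal-walking loops with a single closed-form |dx| == |dy| distance test, so the whole function is one boolean expression.
-- intended difference: On pairs that lie on one geometric diagonal but where q2's row is off the board past q1 (q2[0] > 8 on the upward side or q2[0] < 1 on the downward side), A's loop bounds miss the diagonal and it returns True, while B returns False; the squares are on the same diagonal, so B's geometric answer is the intended one. — e.g. on is_attacking((1, 1), (10, 10)): A returns true, B returns false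
import Mathlib
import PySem

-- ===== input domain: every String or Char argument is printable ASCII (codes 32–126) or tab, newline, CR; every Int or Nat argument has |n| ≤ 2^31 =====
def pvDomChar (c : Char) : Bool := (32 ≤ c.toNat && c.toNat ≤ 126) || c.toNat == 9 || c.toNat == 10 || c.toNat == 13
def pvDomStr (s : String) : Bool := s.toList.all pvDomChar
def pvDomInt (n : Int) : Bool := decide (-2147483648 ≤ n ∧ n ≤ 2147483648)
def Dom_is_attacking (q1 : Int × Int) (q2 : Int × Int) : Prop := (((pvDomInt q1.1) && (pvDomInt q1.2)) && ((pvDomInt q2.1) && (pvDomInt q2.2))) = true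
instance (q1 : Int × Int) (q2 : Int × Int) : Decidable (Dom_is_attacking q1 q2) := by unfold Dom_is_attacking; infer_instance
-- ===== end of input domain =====

-- B replaces A's two diagonal-scanning loops with one closed-form |dx| = |dy| test (objective: simpler).

-- ===== PORT A =====
-- A's two for-loops each 'return False' on a hit and fall through otherwise: ported as List.any over the same ranges, branches in order.
def is_attacking (q1 : Int × Int) (q2 : Int × Int) : Bool :=
  if q1.1 == q2.1 || q1.2 == q2.2 then false
  else if (PySem.List.pyRange 1 (9 - q1.1) 1).any (fun i =>
      if q1.1 + i == q2.1 && q1.2 + i == q2.2 then true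
      else if q1.1 + i == q2.1 && q1.2 - i == q2.2 then true
      else false) then false
  else if (PySem.List.pyRange 0 q1.1 1).any (fun i =>
      if q1.1 - i == q2.1 && q1.2 - i == q2.2 then true
      else if q1.1 - i == q2.1 && q1.2 + i == q2.2 then true
      else false) then false
  else true

-- ===== PORT B =====
def is_attacking_alt (q1 : Int × Int) (q2 : Int × Int) : Bool :=
  q1.1 != q2.1 && q1.2 != q2.2 && (q1.1 - q2.1).natAbs != (q1.2 - q2.2).natAbs

-- ===== PRECONDITION & SPEC =====
-- On pairs on one geometric diagonal whose q2-row is off the board past q1 (q2.1 > 8 upward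
-- or q2.1 < 1 downward), A's loop bounds miss the diagonal and it returns true, while B
-- returns false; the squares are on the same diagonal, so B's geometric answer is intended.
def D_is_attacking (q1 : Int × Int) (q2 : Int × Int) : Prop :=
  (q1.1 - q2.1).natAbs = (q1.2 - q2.2).natAbs ∧
    ((q1.1 < q2.1 ∧ 8 < q2.1) ∨ (q2.1 < q1.1 ∧ q2.1 < 1))
instance (q1 : Int × Int) (q2 : Int × Int) : Decidable (D_is_attacking q1 q2) := by
  unfold D_is_attacking; infer_instance

def Spec_is_attacking (q1 : Int × Int) (q2 : Int × Int) (out : Bool) : Prop :=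
  ¬ D_is_attacking q1 q2 → out = is_attacking_alt q1 q2
instance (q1 : Int × Int) (q2 : Int × Int) (out : Bool) : Decidable (Spec_is_attacking q1 q2 out) := by
  unfold Spec_is_attacking; infer_instance

def pvDiffWitness_is_attacking : (Int × Int) × (Int × Int) := ((1, 1), (10, 10))
def pvDiffWitnessOut_is_attacking : Bool × Bool := (true, false)

-- ===== CLAIM (what is proved, stated in full; the proofs are below) =====
def Claim_unchanged_is_attacking : Prop := ∀ (q1 : Int × Int) (q2 : Int × Int), Dom_is_attacking q1 q2 → Spec_is_attacking q1 q2 (is_attacking q1 q2)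
def Claim_changed_is_attacking : Prop := Dom_is_attacking (pvDiffWitness_is_attacking.1) (pvDiffWitness_is_attacking.2) ∧ D_is_attacking (pvDiffWitness_is_attacking.1) (pvDiffWitness_is_attacking.2) ∧ is_attacking (pvDiffWitness_is_attacking.1) (pvDiffWitness_is_attacking.2) = pvDiffWitnessOut_is_attacking.1 ∧ is_attacking_alt (pvDiffWitness_is_attacking.1) (pvDiffWitness_is_attacking.2) = pvDiffWitnessOut_is_attacking.2 ∧ pvDiffWitnessOut_is_attacking.1 ≠ pvDiffWitnessOut_is_attacking.2
def Claim_exact_is_attacking : Prop := ∀ (q1 : Int × Int) (q2 : Int × Int), Dom_is_attacking q1 q2 → D_is_attacking q1 q2 → is_attacking q1 q2 ≠ is_attacking_alt q1 q2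

-- ===== LEMMAS AND PROOFS =====

-- A's first loop hits exactly the upward in-board diagonal squares.
theorem loop1_char (a b c d : Int) :
    ((PySem.List.pyRange 1 (9 - a) 1).any (fun i =>
        if a + i == c && b + i == d then true
        else if a + i == c && b - i == d then true
        else false) = true) ↔ (a < c ∧ c ≤ 8 ∧ (c - a = d - b ∨ c - a = b - d)) := by
  simp only [List.any_eq_true, PySem.List.mem_pyRange_one]
  constructor
  · rintro ⟨i, ⟨h1, h2⟩, hp⟩
    split_ifs at hp with p1 p2
    · simp only [beq_iff_eq, Bool.and_eq_true] at p1; omega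
    · simp only [beq_iff_eq, Bool.and_eq_true] at p2; omega
  · rintro ⟨h1, h2, h3⟩
    refine ⟨c - a, ⟨by omega, by omega⟩, ?_⟩
    split_ifs with p1 p2
    all_goals first
      | rfl
      | (simp only [beq_iff_eq, Bool.and_eq_true, not_and] at p1 p2; exfalso; omega)

-- A's second loop hits exactly the downward in-board diagonal squares.
theorem loop2_char (a b c d : Int) (hac : a ≠ c) :
    ((PySem.List.pyRange 0 a 1).any (fun i =>
        if a - i == c && b - i == d then true
        else if a - i == c && b + i == d then true
        else false) = true) ↔ (c < a ∧ 1 ≤ c ∧ (a - c = b - d ∨ a - c = d - b)) := by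
  simp only [List.any_eq_true, PySem.List.mem_pyRange_one]
  constructor
  · rintro ⟨i, ⟨h1, h2⟩, hp⟩
    split_ifs at hp with p1 p2
    · simp only [beq_iff_eq, Bool.and_eq_true] at p1; omega
    · simp only [beq_iff_eq, Bool.and_eq_true] at p2; omega
  · rintro ⟨h1, h2, h3⟩
    refine ⟨a - c, ⟨by omega, by omega⟩, ?_⟩
    split_ifs with p1 p2
    all_goals first
      | rfl
      | (simp only [beq_iff_eq, Bool.and_eq_true, not_and] at p1 p2; exfalso; omega)

theorem is_attacking_eq_outside (q1 q2 : Int × Int) (hD : ¬ D_is_attacking q1 q2) :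
    is_attacking q1 q2 = is_attacking_alt q1 q2 := by
  obtain ⟨a, b⟩ := q1
  obtain ⟨c, d⟩ := q2
  simp only [D_is_attacking, not_and, not_or, not_and, not_lt] at hD
  simp only [is_attacking, is_attacking_alt]
  by_cases h0 : a = c ∨ b = d
  · rcases h0 with h | h <;> simp [h]
  · have hac : a ≠ c := fun h => h0 (Or.inl h)
    have hbd : b ≠ d := fun h => h0 (Or.inr h)
    have hg : (a == c || b == d) = false := by simp [hac, hbd]
    simp only [hg, Bool.false_eq_true, if_false, bne, beq_iff_eq]
    by_cases hdiag : (a - c).natAbs = (b - d).natAbs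
    · have hb := hD hdiag
      -- diagonal, and on the board on q2's side: one of the two loops fires
      by_cases hlt : a < c
      · rw [if_pos ((loop1_char a b c d).mpr ⟨hlt, by omega, by omega⟩)]
        simp [hac, hbd, hdiag]
      · rw [if_neg (fun h => by have := (loop1_char a b c d).mp h; omega),
          if_pos ((loop2_char a b c d hac).mpr ⟨by omega, by omega, by omega⟩)]
        simp [hac, hbd, hdiag]
    · rw [if_neg (fun h => by have := (loop1_char a b c d).mp h; omega),
        if_neg (fun h => by have := (loop2_char a b c d hac).mp h; omega)]
      simp [hac, hbd, hdiag]

-- ===== VERDICT (by name: the statements are the Claim_ definitions above) =====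
theorem is_attacking_spec : Claim_unchanged_is_attacking := by
  intro q1 q2 _ hD
  exact is_attacking_eq_outside q1 q2 hD

theorem is_attacking_changed : Claim_changed_is_attacking := by
  unfold Claim_changed_is_attacking; decide

theorem is_attacking_tight : Claim_exact_is_attacking := by
  intro ⟨a, b⟩ ⟨c, d⟩ _ hD
  obtain ⟨hdiag, hside⟩ := hD
  have hac : a ≠ c := by omega
  have hA : is_attacking (a, b) (c, d) = true := by
    simp only [is_attacking]
    rw [if_neg (by simp; omega),
      if_neg (fun h => by have := (loop1_char a b c d).mp h; omega),
      if_neg (fun h => by have := (loop2_char a b c d hac).mp h; omega)]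
  have hB : is_attacking_alt (a, b) (c, d) = false := by
    simp only [is_attacking_alt, bne, beq_iff_eq]
    simp [hdiag]
  rw [hA, hB]; decide
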